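-- pv_equiv track=rewrite | github.com/shadow-maker/GeneradorHorariosUTEC | func.py | getLimHoras
-- ===== SOURCE A (Python) =====
-- def getLimHoras(horario):
-- 	minList = []
-- 	maxList = []
-- 	for dia in horario:
-- 		for i in range(len(dia)):
-- 			if dia[i]:
-- 				minList.append(i)
-- 				break
--
-- 		for i in range(len(dia), 0, -1):
-- 			if dia[i - 1]:
-- 				maxList.append(i - 1)
-- 				break
--
-- 	return min(minList), max(maxList)
-- ===== SOURCE B (Python) =====
-- def getLimHoras(horario):
--     idxs = [i for dia in horario for i in range(len(dia)) if dia[i]]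
--     return min(idxs), max(idxs)
-- ===== Notes on version B (the rewrite author's own statement) =====
-- stated objective: simpler
-- what changed: Replaces the two per-day early-break scans (forward for the first occupied hour, backward for the last) plus min/max over per-day lists with one flat comprehension collecting every occupied index across all days and taking its global min and max.
-- outside the precondition, e.g. on getLimHoras([]): A raises ValueError, B raises ValueError; on getLimHoras([[False, False]]): A raises ValueError, B raises ValueError
import Mathlib
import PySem

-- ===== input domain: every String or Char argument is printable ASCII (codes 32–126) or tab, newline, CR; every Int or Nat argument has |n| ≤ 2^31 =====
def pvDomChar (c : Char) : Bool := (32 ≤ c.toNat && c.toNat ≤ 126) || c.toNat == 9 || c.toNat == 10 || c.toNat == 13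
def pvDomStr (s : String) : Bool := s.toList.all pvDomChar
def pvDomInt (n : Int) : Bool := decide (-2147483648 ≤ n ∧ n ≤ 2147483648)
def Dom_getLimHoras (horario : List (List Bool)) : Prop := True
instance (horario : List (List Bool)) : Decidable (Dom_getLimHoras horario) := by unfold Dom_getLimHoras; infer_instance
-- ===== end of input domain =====

-- B replaces the two per-day early-break scans plus min/max of per-day lists with one
-- flat pass collecting every occupied index and a single global min/max (objective: simpler).

-- ===== PORT A =====
-- 'for i in range(len(dia)): if dia[i]: append(i); break' — first truthy index, counter i
def pvFirstTrue : List Bool → Nat → Option Int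
  | [], _ => none
  | b :: rest, i => if b then some (i : Int) else pvFirstTrue rest (i + 1)

-- 'for i in range(len(dia), 0, -1): if dia[i-1]: append(i-1); break' — k counts down from
-- len(dia); dia[k-1] is always in range there, so getD is exact
def pvLastTrue (dia : List Bool) : Nat → Option Int
  | 0 => none
  | k + 1 => if dia.getD k false then some (k : Int) else pvLastTrue dia k

-- min()/max() raise ValueError on an empty list; Pre_ excludes that, the .getD 0 is unreachable inside Pre_
def getLimHoras (horario : List (List Bool)) : Int × Int :=
  let lists := horario.foldl (fun (acc : List Int × List Int) dia =>
    ((match pvFirstTrue dia 0 with | some i => acc.1 ++ [i] | none => acc.1),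
     (match pvLastTrue dia dia.length with | some i => acc.2 ++ [i] | none => acc.2))) ([], [])
  ((PySem.List.min? lists.1 (fun x => x)).getD 0,
   (PySem.List.max? lists.2 (fun x => x)).getD 0)

-- ===== PORT B =====
-- '[i for i in range(len(dia)) if dia[i]]' for one day, counter i
def pvTruthy : List Bool → Nat → List Int
  | [], _ => []
  | b :: rest, i => if b then (i : Int) :: pvTruthy rest (i + 1) else pvTruthy rest (i + 1)

def getLimHoras_alt (horario : List (List Bool)) : Int × Int :=
  let idxs := horario.flatMap (fun dia => pvTruthy dia 0)
  ((PySem.List.min? idxs (fun x => x)).getD 0,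
   (PySem.List.max? idxs (fun x => x)).getD 0)

-- ===== PRECONDITION & SPEC =====
-- Pre_ excludes exactly the inputs with no truthy cell anywhere: there A's min([]) raises ValueError (B raises too)
def Pre_getLimHoras (horario : List (List Bool)) : Prop :=
  horario.any (fun dia => dia.any (fun b => b)) = true
instance (horario : List (List Bool)) : Decidable (Pre_getLimHoras horario) := by unfold Pre_getLimHoras; infer_instance

def pvWitness_getLimHoras : List (List Bool) := [[false, true], [true, false, false]]

def Spec_getLimHoras (horario : List (List Bool)) (out : Int × Int) : Prop := out = getLimHoras_alt horario
instance (horario : List (List Bool)) (out : Int × Int) : Decidable (Spec_getLimHoras horario out) := by unfold Spec_getLimHoras; infer_instance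

-- ===== CLAIM (what is proved, stated in full; the proofs are below) =====
def Claim_equal_getLimHoras : Prop := ∀ (horario : List (List Bool)), Dom_getLimHoras horario → Pre_getLimHoras horario → Spec_getLimHoras horario (getLimHoras horario)

-- ===== LEMMAS AND PROOFS =====

-- membership in the per-day index list
theorem mem_pvTruthy (dia : List Bool) (n : Nat) (j : Int) :
    j ∈ pvTruthy dia n ↔ ∃ m : Nat, m < dia.length ∧ dia.getD m false = true ∧ j = (n : Int) + m := by
  induction dia generalizing n with
  | nil => simp [pvTruthy]
  | cons b rest ih =>
    constructor
    · intro hj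
      by_cases hb : b
      · simp only [pvTruthy, hb, if_true, List.mem_cons] at hj
        rcases hj with rfl | hj
        · exact ⟨0, by simp, by simpa using hb, by simp⟩
        · rcases (ih (n + 1)).1 hj with ⟨m, hm, hg, rfl⟩
          exact ⟨m + 1, by simp only [List.length_cons]; omega, by simpa using hg, by push_cast; ring⟩
      · simp only [pvTruthy, hb, if_false] at hj
        rcases (ih (n + 1)).1 hj with ⟨m, hm, hg, rfl⟩
        exact ⟨m + 1, by simp only [List.length_cons]; omega, by simpa using hg, by push_cast; ring⟩
    · rintro ⟨m, hm, hg, rfl⟩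
      cases m with
      | zero =>
        simp only [List.getD_cons_zero] at hg
        simp [pvTruthy, hg]
      | succ m =>
        simp only [List.getD_cons_succ] at hg
        have : ((n : Int) + (m + 1 : Nat)) ∈ pvTruthy rest (n + 1) := by
          exact (ih (n + 1)).2 ⟨m, by simp only [List.length_cons] at hm; omega, hg, by push_cast; ring⟩
        by_cases hb : b <;> simp only [pvTruthy, hb, if_true, if_false, List.mem_cons] <;>
          [right; skip] <;> exact this

theorem pvTruthy_lb (dia : List Bool) (n : Nat) : ∀ j ∈ pvTruthy dia n, (n : Int) ≤ j := by
  intro j hj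
  rcases (mem_pvTruthy dia n j).1 hj with ⟨m, _, _, rfl⟩
  omega

theorem pvFirstTrue_eq_head? (dia : List Bool) (n : Nat) :
    pvFirstTrue dia n = (pvTruthy dia n).head? := by
  induction dia generalizing n with
  | nil => rfl
  | cons b rest ih =>
    by_cases hb : b <;> simp [pvFirstTrue, pvTruthy, hb, ih]

theorem pvFirstTrue_min (dia : List Bool) (n : Nat) (i : Int)
    (h : pvFirstTrue dia n = some i) : ∀ j ∈ pvTruthy dia n, i ≤ j := by
  induction dia generalizing n with
  | nil => simp [pvTruthy]
  | cons b rest ih =>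
    by_cases hb : b
    · simp only [pvFirstTrue, hb, if_true, Option.some.injEq] at h
      subst h
      simp only [pvTruthy, hb, if_true, List.mem_cons]
      rintro j (rfl | hj)
      · exact le_refl _
      · have := pvTruthy_lb rest (n + 1) j hj
        omega
    · simp only [pvFirstTrue, hb, if_false] at h
      simp only [pvTruthy, hb, if_false]
      exact ih (n + 1) h

theorem pvFirstTrue_none (dia : List Bool) (n : Nat)
    (h : pvFirstTrue dia n = none) : pvTruthy dia n = [] := by
  rw [pvFirstTrue_eq_head?] at h
  exact List.head?_eq_none_iff.mp h

theorem pvFirstTrue_mem (dia : List Bool) (n : Nat) (i : Int)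
    (h : pvFirstTrue dia n = some i) : i ∈ pvTruthy dia n := by
  rw [pvFirstTrue_eq_head?] at h
  exact List.mem_of_mem_head? h

-- backward-scan lemmas, induction on the counter
theorem pvLastTrue_none (dia : List Bool) (k : Nat)
    (h : pvLastTrue dia k = none) : ∀ m : Nat, m < k → dia.getD m false = false := by
  induction k with
  | zero => omega
  | succ k ih =>
    simp only [pvLastTrue] at h
    by_cases hg : dia.getD k false = true
    · rw [if_pos hg] at h; exact absurd h (by simp)
    · rw [if_neg hg] at h
      intro m hm
      rcases Nat.lt_succ_iff_lt_or_eq.mp hm with hm' | rfl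
      · exact ih h m hm'
      · simpa using hg

theorem pvLastTrue_some (dia : List Bool) (k : Nat) (i : Int)
    (h : pvLastTrue dia k = some i) :
    ∃ m : Nat, i = (m : Int) ∧ m < k ∧ dia.getD m false = true := by
  induction k with
  | zero => simp [pvLastTrue] at h
  | succ k ih =>
    simp only [pvLastTrue] at h
    by_cases hg : dia.getD k false = true
    · rw [if_pos hg] at h
      exact ⟨k, (Option.some.injEq _ _ ▸ h).symm, by omega, hg⟩
    · rw [if_neg hg] at h
      rcases ih h with ⟨m, rfl, hm, hgm⟩
      exact ⟨m, rfl, by omega, hgm⟩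

theorem pvLastTrue_max (dia : List Bool) (k : Nat) (i : Int)
    (h : pvLastTrue dia k = some i) :
    ∀ m : Nat, m < k → dia.getD m false = true → (m : Int) ≤ i := by
  induction k with
  | zero => omega
  | succ k ih =>
    simp only [pvLastTrue] at h
    by_cases hg : dia.getD k false = true
    · rw [if_pos hg] at h
      have hik : i = (k : Int) := (Option.some.injEq _ _ ▸ h).symm
      subst hik
      intro m hm _
      omega
    · rw [if_neg hg] at h
      intro m hm hgm
      rcases Nat.lt_succ_iff_lt_or_eq.mp hm with hm' | rfl
      · exact ih h m hm' hgm
      · exact absurd hgm hg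

theorem day_last_none (dia : List Bool)
    (h : pvLastTrue dia dia.length = none) : pvTruthy dia 0 = [] := by
  rw [List.eq_nil_iff_forall_not_mem]
  intro j hj
  rcases (mem_pvTruthy dia 0 j).1 hj with ⟨m, hm, hg, rfl⟩
  rw [pvLastTrue_none dia dia.length h m hm] at hg
  exact Bool.false_ne_true hg

theorem day_last_mem (dia : List Bool) (i : Int)
    (h : pvLastTrue dia dia.length = some i) : i ∈ pvTruthy dia 0 := by
  rcases pvLastTrue_some dia dia.length i h with ⟨m, rfl, hm, hg⟩
  exact (mem_pvTruthy dia 0 _).2 ⟨m, hm, hg, by simp⟩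

theorem day_last_ub (dia : List Bool) (i : Int)
    (h : pvLastTrue dia dia.length = some i) : ∀ j ∈ pvTruthy dia 0, j ≤ i := by
  intro j hj
  rcases (mem_pvTruthy dia 0 j).1 hj with ⟨m, hm, hg, rfl⟩
  simpa using pvLastTrue_max dia dia.length i h m hm hg

-- A's two accumulated lists, written structurally
def minL : List (List Bool) → List Int
  | [] => []
  | dia :: rest => (match pvFirstTrue dia 0 with | some i => [i] | none => []) ++ minL rest

def maxL : List (List Bool) → List Int
  | [] => []
  | dia :: rest => (match pvLastTrue dia dia.length with | some i => [i] | none => []) ++ maxL rest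

theorem fold_eq (horario : List (List Bool)) (acc : List Int × List Int) :
    horario.foldl (fun (acc : List Int × List Int) dia =>
      ((match pvFirstTrue dia 0 with | some i => acc.1 ++ [i] | none => acc.1),
       (match pvLastTrue dia dia.length with | some i => acc.2 ++ [i] | none => acc.2))) acc
    = (acc.1 ++ minL horario, acc.2 ++ maxL horario) := by
  induction horario generalizing acc with
  | nil => simp [minL, maxL]
  | cons dia rest ih =>
    simp only [List.foldl_cons, ih, minL, maxL]
    cases pvFirstTrue dia 0 <;> cases pvLastTrue dia dia.length <;> simp

def pvIdxs (horario : List (List Bool)) : List Int := horario.flatMap (fun dia => pvTruthy dia 0)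

theorem minL_subset (horario : List (List Bool)) : ∀ x ∈ minL horario, x ∈ pvIdxs horario := by
  induction horario with
  | nil => simp [minL, pvIdxs]
  | cons dia rest ih =>
    intro x hx
    simp only [minL, List.mem_append] at hx
    simp only [pvIdxs, List.flatMap_cons, List.mem_append]
    rcases hx with hx | hx
    · left
      cases hf : pvFirstTrue dia 0 with
      | none => simp [hf] at hx
      | some i =>
        simp only [hf, List.mem_singleton] at hx
        rw [hx]; exact pvFirstTrue_mem dia 0 i hf
    · right; exact ih x hx

theorem maxL_subset (horario : List (List Bool)) : ∀ x ∈ maxL horario, x ∈ pvIdxs horario := by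
  induction horario with
  | nil => simp [maxL, pvIdxs]
  | cons dia rest ih =>
    intro x hx
    simp only [maxL, List.mem_append] at hx
    simp only [pvIdxs, List.flatMap_cons, List.mem_append]
    rcases hx with hx | hx
    · left
      cases hf : pvLastTrue dia dia.length with
      | none => simp [hf] at hx
      | some i =>
        simp only [hf, List.mem_singleton] at hx
        rw [hx]; exact day_last_mem dia i hf
    · right; exact ih x hx

theorem minL_covers (horario : List (List Bool)) :
    ∀ y ∈ pvIdxs horario, ∃ x ∈ minL horario, x ≤ y := by
  induction horario with
  | nil => simp [pvIdxs]
  | cons dia rest ih =>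
    intro y hy
    simp only [pvIdxs, List.flatMap_cons, List.mem_append] at hy
    rcases hy with hy | hy
    · cases hf : pvFirstTrue dia 0 with
      | none => rw [pvFirstTrue_none dia 0 hf] at hy; simp at hy
      | some i => exact ⟨i, by simp [minL, hf], pvFirstTrue_min dia 0 i hf y hy⟩
    · rcases ih y hy with ⟨x, hx, hxy⟩
      exact ⟨x, by simp [minL, List.mem_append]; right; exact hx, hxy⟩

theorem maxL_covers (horario : List (List Bool)) :
    ∀ y ∈ pvIdxs horario, ∃ x ∈ maxL horario, y ≤ x := by
  induction horario with
  | nil => simp [pvIdxs]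
  | cons dia rest ih =>
    intro y hy
    simp only [pvIdxs, List.flatMap_cons, List.mem_append] at hy
    rcases hy with hy | hy
    · cases hf : pvLastTrue dia dia.length with
      | none => rw [day_last_none dia hf] at hy; simp at hy
      | some i => exact ⟨i, by simp [maxL, hf], day_last_ub dia i hf y hy⟩
    · rcases ih y hy with ⟨x, hx, hxy⟩
      exact ⟨x, by simp [maxL, List.mem_append]; right; exact hx, hxy⟩

theorem min_eq (horario : List (List Bool)) (hne : pvIdxs horario ≠ []) :
    PySem.List.min? (minL horario) (fun x => x) = PySem.List.min? (pvIdxs horario) (fun x => x) := by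
  cases hb : PySem.List.min? (pvIdxs horario) (fun x => x) with
  | none => exact absurd ((PySem.List.min?_eq_none_iff _ _).mp hb) hne
  | some b =>
    have hbmem := PySem.List.min?_mem hb
    cases ha : PySem.List.min? (minL horario) (fun x => x) with
    | none =>
      rcases minL_covers horario b hbmem with ⟨x0, hx0, _⟩
      rw [(PySem.List.min?_eq_none_iff _ _).mp ha] at hx0; simp at hx0
    | some a =>
      have hamem := PySem.List.min?_mem ha
      have h1 : b ≤ a := PySem.List.min?_isMin hb a (minL_subset horario a hamem)
      rcases minL_covers horario b hbmem with ⟨x, hx, hxb⟩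
      have h2 : a ≤ x := PySem.List.min?_isMin ha x hx
      exact congrArg some (le_antisymm (le_trans h2 hxb) h1)

theorem max_eq (horario : List (List Bool)) (hne : pvIdxs horario ≠ []) :
    PySem.List.max? (maxL horario) (fun x => x) = PySem.List.max? (pvIdxs horario) (fun x => x) := by
  cases hb : PySem.List.max? (pvIdxs horario) (fun x => x) with
  | none => exact absurd ((PySem.List.max?_eq_none_iff _ _).mp hb) hne
  | some b =>
    have hbmem := PySem.List.max?_mem hb
    cases ha : PySem.List.max? (maxL horario) (fun x => x) with
    | none =>
      rcases maxL_covers horario b hbmem with ⟨x0, hx0, _⟩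
      rw [(PySem.List.max?_eq_none_iff _ _).mp ha] at hx0; simp at hx0
    | some a =>
      have hamem := PySem.List.max?_mem ha
      have h1 : a ≤ b := PySem.List.max?_isMax hb a (maxL_subset horario a hamem)
      rcases maxL_covers horario b hbmem with ⟨x, hx, hbx⟩
      have h2 : x ≤ a := PySem.List.max?_isMax ha x hx
      exact congrArg some (le_antisymm h1 (le_trans hbx h2))

theorem pre_nonempty (horario : List (List Bool)) (hpre : Pre_getLimHoras horario) :
    pvIdxs horario ≠ [] := by
  unfold Pre_getLimHoras at hpre
  simp only [List.any_eq_true] at hpre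
  rcases hpre with ⟨dia, hdia, b, hb, hbt⟩
  rcases List.mem_iff_getElem.mp hb with ⟨m, hm, rfl⟩
  intro hnil
  have : ((m : Int)) ∈ pvIdxs horario := by
    simp only [pvIdxs, List.mem_flatMap]
    refine ⟨dia, hdia, (mem_pvTruthy dia 0 _).2 ⟨m, hm, ?_, by simp⟩⟩
    rw [List.getD_eq_getElem dia false hm]
    simpa using hbt
  rw [hnil] at this
  simp at this

-- ===== VERDICT (by name: the statement is the Claim_ definition above) =====
theorem getLimHoras_spec : Claim_equal_getLimHoras := by
  intro horario _ hpre
  unfold Spec_getLimHoras getLimHoras getLimHoras_alt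
  simp only [fold_eq, List.nil_append]
  have hne := pre_nonempty horario hpre
  rw [show horario.flatMap (fun dia => pvTruthy dia 0) = pvIdxs horario from rfl,
      min_eq horario hne, max_eq horario hne]
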